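-- pv_equiv track=rewrite | github.com/miho73/blink-backstage | core/user/user_info_service.py | role_to_school
-- ===== SOURCE A (Python) =====
-- from typing import Type, Optional
--
-- def role_to_school(roles: list[str]) -> (bool, Optional[str]):
--   student_verified: bool = False
--   neis_code = None
--
--   for role in roles:
--     if role == 'core:student':
--       student_verified = True
--     elif role.startswith('sv:'):
--       neis_code = role.split(':')[1]
--
--   return student_verified, neis_code
-- ===== SOURCE B (Python) =====
-- def role_to_school(roles: list[str]):
--   student_verified = 'core:student' in roles
--   neis_code = next((r.split(':')[1] for r in reversed(roles) if r.startswith('sv:')), None)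
--   return student_verified, neis_code
-- ===== Notes on version B (the rewrite author's own statement) =====
-- stated objective: simpler
-- what changed: Replaces the fused accumulator loop by two independent derivations: a membership test for the verified flag, and a reversed-scan first-match (next over a generator) for the last sv: code.
import Mathlib
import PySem

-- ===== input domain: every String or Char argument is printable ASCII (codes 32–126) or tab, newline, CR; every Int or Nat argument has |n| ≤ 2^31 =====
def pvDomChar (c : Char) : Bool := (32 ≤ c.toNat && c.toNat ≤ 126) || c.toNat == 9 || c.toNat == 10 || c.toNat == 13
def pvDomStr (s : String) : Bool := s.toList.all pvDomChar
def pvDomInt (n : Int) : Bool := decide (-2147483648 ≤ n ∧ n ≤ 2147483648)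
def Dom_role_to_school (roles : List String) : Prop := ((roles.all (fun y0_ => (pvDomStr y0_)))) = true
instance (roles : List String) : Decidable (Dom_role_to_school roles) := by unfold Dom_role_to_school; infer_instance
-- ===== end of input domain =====

-- B computes the two outputs independently (membership test + reversed first match) instead of A's fused accumulator loop; simpler decomposition, same cost.

-- ===== PORT A =====
-- Python 'role.split(':')[1]': index 1 always exists here since the branch requires startswith "sv:"; pyGet? returns it as some _.
def role_to_school (roles : List String) : Bool × Option String :=
  roles.foldl (fun st role =>
    if role == "core:student" then (true, st.2)
    else if PySem.Str.startswith role "sv:" then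
      (st.1, PySem.List.pyGet? ((PySem.Str.split? role ":").getD []) 1)
    else st) (false, none)

-- ===== PORT B =====
def role_to_school_alt (roles : List String) : Bool × Option String :=
  (roles.contains "core:student",
   match roles.reverse.find? (fun r => PySem.Str.startswith r "sv:") with
   | some r => PySem.List.pyGet? ((PySem.Str.split? r ":").getD []) 1
   | none => none)

-- ===== PRECONDITION & SPEC =====
def Spec_role_to_school (roles : List String) (out : Bool × Option String) : Prop := out = role_to_school_alt roles
instance (roles : List String) (out : Bool × Option String) : Decidable (Spec_role_to_school roles out) := by unfold Spec_role_to_school; infer_instance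

-- ===== CLAIM (what is proved, stated in full; the proofs are below) =====
def Claim_equal_role_to_school : Prop := ∀ (roles : List String), Dom_role_to_school roles → Spec_role_to_school roles (role_to_school roles)

-- ===== LEMMAS AND PROOFS =====

lemma role_to_school_loop (rs : List String) (b : Bool) (o : Option String) :
    rs.foldl (fun st role =>
      if role == "core:student" then (true, st.2)
      else if PySem.Str.startswith role "sv:" then
        (st.1, PySem.List.pyGet? ((PySem.Str.split? role ":").getD []) 1)
      else st) (b, o)
    = (b || rs.contains "core:student",
       match rs.reverse.find? (fun r => PySem.Str.startswith r "sv:") with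
       | some r => PySem.List.pyGet? ((PySem.Str.split? r ":").getD []) 1
       | none => o) := by
  induction rs generalizing b o with
  | nil => simp
  | cons r rs ih =>
    simp only [List.foldl_cons, List.reverse_cons, List.find?_append, List.contains_cons]
    by_cases hc : r = "core:student"
    · subst hc
      rw [if_pos (by decide), ih]
      have hsv : PySem.Chars.startswith ['c','o','r','e',':','s','t','u','d','e','n','t'] ['s','v',':'] = false := by decide
      cases rs.reverse.find? (fun r => PySem.Str.startswith r "sv:") <;>
        simp [List.find?, hsv, Option.or]
    · rw [if_neg (by simpa using hc)]
      have hcr : ("core:student" == r) = false := by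
        simp only [beq_eq_false_iff_ne, ne_eq]; exact fun h => hc h.symm
      by_cases hs : PySem.Str.startswith r "sv:" = true
      · rw [if_pos hs, ih]
        rw [PySem.Str.startswith_eq] at hs
        have hs2 : PySem.Chars.startswith r.toList ['s','v',':'] = true := hs
        cases rs.reverse.find? (fun r => PySem.Str.startswith r "sv:") <;>
          simp [List.find?, hs2, hcr, Option.or]
      · rw [if_neg hs, ih]
        rw [PySem.Str.startswith_eq] at hs
        have hs2 : PySem.Chars.startswith r.toList ['s','v',':'] = false :=
          Bool.not_eq_true _ ▸ eq_false_of_ne_true hs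
        cases rs.reverse.find? (fun r => PySem.Str.startswith r "sv:") <;>
          simp [List.find?, hs2, hcr, Option.or]

-- ===== VERDICT (by name: the statement is the Claim_ definition above) =====
theorem role_to_school_spec : Claim_equal_role_to_school := by
  intro roles _
  unfold Spec_role_to_school role_to_school role_to_school_alt
  rw [role_to_school_loop]
  simp
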